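-- pv_equiv track=rewrite | github.com/rodrigolgimenes/databricks-product | migration_engine/sanitizer/sql_sanitizer.py | _balance_single_quotes
-- ===== SOURCE A (Python) =====
-- def _balance_single_quotes(sql: str) -> str:
--     """
--     If single-quote count (excluding doubled '') is odd, try to fix.
--     """
--     # Remove all doubled single-quotes before counting
--     temp = sql.replace("''", "")
--     sq_count = temp.count("'")
--     if sq_count % 2 == 0:
--         return sql
--
--     # Heuristic: find the last line with an orphan single-quote and close it
--     lines = sql.split("\n")
--     for i in range(len(lines) - 1, -1, -1):
--         temp_line = lines[i].replace("''", "")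
--         if temp_line.count("'") % 2 != 0:
--             stripped = lines[i].rstrip()
--             if stripped.endswith("'"):
--                 # Trailing orphan — might be truncated; leave as-is
--                 # (removing would break the actual literal)
--                 pass
--             else:
--                 lines[i] = stripped + "'"
--             break
--
--     return "\n".join(lines)
-- ===== SOURCE B (Python) =====
-- def _balance_single_quotes(sql: str) -> str:
--     # Single character-level scan: no split/join and no "''" removal pass.
--     # Deleting doubled quotes never changes quote-count parity, so raw
--     # parity per line (and globally) is enough; we track the character
--     # span (start, end) of the last odd-parity line and repair by slicing.
--     parity = 0
--     line_parity = 0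
--     start = 0
--     last = None
--     for idx, ch in enumerate(sql):
--         if ch == "'":
--             line_parity ^= 1
--             parity ^= 1
--         elif ch == "\n":
--             if line_parity:
--                 last = (start, idx)
--             line_parity = 0
--             start = idx + 1
--     if line_parity:
--         last = (start, len(sql))
--     if parity == 0:
--         return sql
--     s, e = last  # odd global parity guarantees some odd line exists
--     stripped = sql[s:e].rstrip()
--     if stripped.endswith("'"):
--         return sql
--     return sql[:s] + stripped + "'" + sql[e:]
-- ===== Notes on version B (the rewrite author's own statement) =====
-- stated objective: alternative
-- what changed: Replaces A's global replace/count pass plus split and reverse break-loop with one character-level scan of the raw string that tracks quote parity per line (removing doubled quotes never changes parity, so no '' stripping is needed) and records the (start,end) character span of the last odd-parity line, then repairs by string slicing instead of rejoining split lines.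
import Mathlib
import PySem

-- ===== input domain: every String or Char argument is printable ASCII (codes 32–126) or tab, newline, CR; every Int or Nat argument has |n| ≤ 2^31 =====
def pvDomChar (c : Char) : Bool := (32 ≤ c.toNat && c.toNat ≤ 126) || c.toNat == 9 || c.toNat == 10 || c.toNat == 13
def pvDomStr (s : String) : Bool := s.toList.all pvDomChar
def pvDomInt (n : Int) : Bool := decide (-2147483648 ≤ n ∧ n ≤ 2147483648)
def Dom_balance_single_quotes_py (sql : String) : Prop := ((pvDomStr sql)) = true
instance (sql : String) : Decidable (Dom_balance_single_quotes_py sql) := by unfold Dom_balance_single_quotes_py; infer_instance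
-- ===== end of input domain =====

-- B replaces A's replace/count pass + split + reverse break-loop with a single character-level scan
-- (raw quote parity per line; doubled quotes never change parity) that records the span of the last
-- odd line and repairs by slicing; same asymptotic cost ('alternative').


-- ===== PORT A =====
-- A's reverse loop 'for i in range(len(lines)-1, -1, -1): … break', one step per index
def pvFixA (lines : List String) : List Int → List String
  | [] => lines
  | i :: rest =>
    match PySem.List.pyGet? lines i with
    | none => lines   -- unreachable: pyRange indices are in range, Python's lines[i] never raises here
    | some li =>
      if PySem.Str.count (PySem.Str.replace li "''" "") "'" % 2 ≠ 0 then
        let stripped := PySem.Str.rstrip li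
        if PySem.Str.endswith stripped "'" then lines
        else lines.set i.toNat (stripped ++ "'")
      else pvFixA lines rest

def balance_single_quotes_py (sql : String) : String :=
  let temp := PySem.Str.replace sql "''" ""
  let sq_count := PySem.Str.count temp "'"
  if sq_count % 2 = 0 then sql
  else
    match PySem.Str.split? sql "\n" with
    | none => sql   -- unreachable: the separator "\n" is nonempty
    | some lines =>
      PySem.Str.join "\n" (pvFixA lines (PySem.List.pyRange ((lines.length : Int) - 1) (-1) (-1)))

-- ===== PORT B =====
-- Source B's 'for idx, ch in enumerate(sql)' loop: state = (idx, start, line_parity, parity, last);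
-- the final 'if line_parity: last = (start, len(sql))' is the base case.
def pvScan : List Char → Nat → Nat → Bool → Bool → Option (Nat × Nat) → Bool × Option (Nat × Nat)
  | [], idx, start, lp, p, last => (p, if lp then some (start, idx) else last)
  | c :: t, idx, start, lp, p, last =>
    if c = '\'' then pvScan t (idx + 1) start (!lp) (!p) last
    else if c = '\n' then pvScan t (idx + 1) (idx + 1) false p (if lp then some (start, idx) else last)
    else pvScan t (idx + 1) start lp p last

def balance_single_quotes_py_alt (sql : String) : String :=
  match pvScan sql.toList 0 0 false false none with
  | (false, _) => sql
  | (true, none) => sql   -- unreachable: odd global parity implies some odd line was recorded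
  | (true, some (s, e)) =>
    let stripped := PySem.Str.rstrip (PySem.Str.slice sql (some (s : Int)) (some (e : Int)))
    if PySem.Str.endswith stripped "'" then sql
    else PySem.Str.slice sql none (some (s : Int)) ++ stripped ++ "'" ++ PySem.Str.slice sql (some (e : Int)) none

-- ===== PRECONDITION & SPEC =====
def Spec_balance_single_quotes_py (sql : String) (out : String) : Prop := out = balance_single_quotes_py_alt sql
instance (sql : String) (out : String) : Decidable (Spec_balance_single_quotes_py sql out) := by unfold Spec_balance_single_quotes_py; infer_instance

-- ===== CLAIM (what is proved, stated in full; the proofs are below) =====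
def Claim_equal_balance_single_quotes_py : Prop := ∀ (sql : String), Dom_balance_single_quotes_py sql → Spec_balance_single_quotes_py sql (balance_single_quotes_py sql)

-- ===== LEMMAS AND PROOFS =====

-- odd quote parity, raw (char level) and A-style (after removing doubled quotes)
def pvOddb (l : List Char) : Bool := l.count '\'' % 2 == 1
def pvOddQ (s : String) : Bool := PySem.Str.count (PySem.Str.replace s "''" "") "'" % 2 != 0

-- reference splitter: pvSplit pre l = the lines of (pre ++ l), pre being the partial current line
def pvSplit : List Char → List Char → List (List Char)
  | pre, [] => [pre]
  | pre, c :: t => if c = '\n' then pre :: pvSplit [] t else pvSplit (pre ++ [c]) t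

-- last odd line: index + line, char level and string level
def pvLastOddC : List (List Char) → Option (Nat × List Char)
  | [] => none
  | l :: t =>
    match pvLastOddC t with
    | some (j, s) => some (j + 1, s)
    | none => if pvOddb l then some (0, l) else none

def pvLastOddS : List String → Option (Nat × String)
  | [] => none
  | l :: t =>
    match pvLastOddS t with
    | some (j, s) => some (j + 1, s)
    | none => if pvOddQ l then some (0, l) else none

-- character offset of line i inside the joined text
def pvOff : List (List Char) → Nat → Nat
  | _, 0 => 0
  | [], _ + 1 => 0
  | l :: t, i + 1 => l.length + 1 + pvOff t i

-- span of the last odd line, as pvScan computes it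
def pvLastSpan : List (List Char) → Nat → Option (Nat × Nat)
  | [], _ => none
  | l :: t, base =>
    match pvLastSpan t (base + l.length + 1) with
    | some sp => some sp
    | none => if pvOddb l then some (base, base + l.length) else none

def pvOddSum (L : List (List Char)) : Bool := L.foldr (fun l b => pvOddb l ^^ b) false

-- ---------- counting / parity lemmas ----------
lemma pvCountGo (fuel : Nat) : ∀ (l : List Char) (acc : Nat), l.length ≤ fuel →
    PySem.Chars.count.go ['\''] fuel l acc = acc + l.count '\'' := by
  induction fuel with
  | zero =>
    intro l acc h
    have : l = [] := List.eq_nil_of_length_eq_zero (Nat.le_zero.mp h)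
    subst this; simp [PySem.Chars.count.go]
  | succ n ih =>
    intro l acc h
    cases l with
    | nil => simp [PySem.Chars.count.go]
    | cons c t =>
      rw [show PySem.Chars.count.go ['\''] (n + 1) (c :: t) acc
          = if ['\''].isPrefixOf (c :: t) = true
            then PySem.Chars.count.go ['\''] n (List.drop ['\''].length (c :: t)) (acc + 1)
            else PySem.Chars.count.go ['\''] n t acc from rfl]
      have ht : t.length ≤ n := by simpa using h
      by_cases hc : c = '\''
      · subst hc
        rw [if_pos (by simp [List.isPrefixOf])]
        rw [show List.drop ['\''].length ('\'' :: t) = t by simp]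
        rw [ih t (acc + 1) ht]
        simp
        omega
      · rw [if_neg (by simp [List.isPrefixOf]; exact fun h' => hc h'.symm)]
        rw [ih t acc ht]
        simp [hc]

lemma pvCountQ (l : List Char) : PySem.Chars.count l ['\''] = l.count '\'' := by
  simp [PySem.Chars.count, pvCountGo l.length l 0 le_rfl]

lemma pvReplaceGoParity (fuel : Nat) : ∀ (l acc : List Char),
    (PySem.Chars.replace.go ['\'', '\''] [] fuel l acc).count '\'' % 2
      = (acc.count '\'' + l.count '\'') % 2 := by
  induction fuel with
  | zero => intro l acc; simp [PySem.Chars.replace.go, List.count_append, Nat.add_comm]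
  | succ n ih =>
    intro l acc
    cases l with
    | nil => simp [PySem.Chars.replace.go]
    | cons c t =>
      rw [show PySem.Chars.replace.go ['\'', '\''] [] (n + 1) (c :: t) acc
          = if ['\'', '\''].isPrefixOf (c :: t) = true
            then PySem.Chars.replace.go ['\'', '\''] [] n
              (List.drop (['\'', '\''].length) (c :: t)) (([] : List Char).reverse ++ acc)
            else PySem.Chars.replace.go ['\'', '\''] [] n t (c :: acc) from rfl]
      by_cases hp : (['\'', '\''].isPrefixOf (c :: t)) = true
      · rw [if_pos hp]
        cases t with
        | nil => simp [List.isPrefixOf] at hp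
        | cons c2 t2 =>
          have h1 : c = '\'' := by
            have := (by simpa [List.isPrefixOf, and_assoc] using hp : '\'' = c ∧ '\'' = c2)
            exact this.1.symm
          have h2 : c2 = '\'' := by
            have := (by simpa [List.isPrefixOf, and_assoc] using hp : '\'' = c ∧ '\'' = c2)
            exact this.2.symm
          subst h1; subst h2
          rw [show List.drop (['\'', '\''].length) ('\'' :: '\'' :: t2) = t2 by simp]
          rw [show ([] : List Char).reverse ++ acc = acc by simp]
          rw [ih t2 acc]
          simp
          omega
      · rw [if_neg hp]
        rw [ih t (c :: acc)]
        simp [List.count_cons]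
        omega

lemma pvParityStr (s : String) :
    PySem.Str.count (PySem.Str.replace s "''" "") "'" % 2 = s.toList.count '\'' % 2 := by
  have h1 : PySem.Str.count (PySem.Str.replace s "''" "") "'"
      = (PySem.Chars.replace s.toList ['\'', '\''] []).count '\'' := by
    simp [PySem.Str.count, PySem.Str.replace, pvCountQ, String.toList_ofList,
      show ("''" : String).toList = ['\'', '\''] from rfl,
      show ("'" : String).toList = ['\''] from rfl,
      show ("" : String).toList = [] from rfl]
  rw [h1]
  have h2 : PySem.Chars.replace s.toList ['\'', '\''] []
      = PySem.Chars.replace.go ['\'', '\''] [] s.toList.length s.toList [] := by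
    simp [PySem.Chars.replace]
  rw [h2, pvReplaceGoParity]
  simp

lemma pvOddQ_eq (s : String) : pvOddQ s = pvOddb s.toList := by
  unfold pvOddQ pvOddb
  rw [pvParityStr]
  rcases Nat.mod_two_eq_zero_or_one (s.toList.count '\'') with h | h <;> simp [h]

-- ---------- splitOn = pvSplit ----------
lemma pvSplitOnGo (fuel : Nat) : ∀ (l cur : List Char) (acc : List (List Char)), l.length ≤ fuel →
    PySem.Chars.splitOn.go ['\n'] fuel l cur acc = acc.reverse ++ pvSplit cur.reverse l := by
  induction fuel with
  | zero =>
    intro l cur acc h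
    have : l = [] := List.eq_nil_of_length_eq_zero (Nat.le_zero.mp h)
    subst this
    simp [PySem.Chars.splitOn.go, pvSplit]
  | succ n ih =>
    intro l cur acc h
    cases l with
    | nil => simp [PySem.Chars.splitOn.go, pvSplit]
    | cons c t =>
      rw [show PySem.Chars.splitOn.go ['\n'] (n + 1) (c :: t) cur acc
          = if ['\n'].isPrefixOf (c :: t) = true
            then PySem.Chars.splitOn.go ['\n'] n (List.drop ['\n'].length (c :: t)) [] (cur.reverse :: acc)
            else PySem.Chars.splitOn.go ['\n'] n t (c :: cur) acc from rfl]
      have ht : t.length ≤ n := by simpa using h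
      by_cases hc : c = '\n'
      · subst hc
        rw [if_pos (by simp [List.isPrefixOf])]
        rw [show List.drop ['\n'].length ('\n' :: t) = t by simp]
        rw [ih t [] (cur.reverse :: acc) ht]
        simp [pvSplit]
      · rw [if_neg (by simp [List.isPrefixOf]; exact fun h' => hc h'.symm)]
        rw [ih t (c :: cur) acc ht]
        simp [pvSplit, hc]

lemma pvSplitOn (cs : List Char) : PySem.Chars.splitOn cs ['\n'] = pvSplit [] cs := by
  have := pvSplitOnGo (cs.length + 1) cs [] [] (by omega)
  simpa [PySem.Chars.splitOn] using this

lemma pvSplit_ne_nil : ∀ (l pre : List Char), pvSplit pre l ≠ [] := by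
  intro l
  induction l with
  | nil => intro pre; simp [pvSplit]
  | cons c t ih =>
    intro pre
    by_cases hc : c = '\n' <;> simp [pvSplit, hc, ih]

lemma pvInterCons (x : List Char) (t : List (List Char)) (h : t ≠ []) :
    List.intercalate ['\n'] (x :: t) = x ++ '\n' :: List.intercalate ['\n'] t := by
  obtain ⟨y, ys, rfl⟩ := List.exists_cons_of_ne_nil h
  simp [List.intercalate, List.intersperse]

lemma pvSplit_intercalate : ∀ (l pre : List Char),
    List.intercalate ['\n'] (pvSplit pre l) = pre ++ l := by
  intro l
  induction l with
  | nil => intro pre; simp [pvSplit, List.intercalate]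
  | cons c t ih =>
    intro pre
    by_cases hc : c = '\n'
    · subst hc
      rw [show pvSplit pre ('\n' :: t) = pre :: pvSplit [] t by simp [pvSplit]]
      rw [pvInterCons _ _ (pvSplit_ne_nil t [])]
      rw [ih []]
      simp
    · rw [show pvSplit pre (c :: t) = pvSplit (pre ++ [c]) t by simp [pvSplit, hc]]
      rw [ih (pre ++ [c])]
      simp

lemma pvSplit_no_nl : ∀ (l pre : List Char), '\n' ∉ pre →
    ∀ x ∈ pvSplit pre l, '\n' ∉ x := by
  intro l
  induction l with
  | nil => intro pre hp x hx; simp [pvSplit] at hx; subst hx; exact hp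
  | cons c t ih =>
    intro pre hp x hx
    by_cases hc : c = '\n'
    · subst hc
      simp [pvSplit] at hx
      rcases hx with rfl | hx
      · exact hp
      · exact ih [] (by simp) x hx
    · rw [show pvSplit pre (c :: t) = pvSplit (pre ++ [c]) t by simp [pvSplit, hc]] at hx
      exact ih (pre ++ [c]) (by simp [hp, Ne.symm hc]) x hx

lemma pvSplit_count : ∀ (l pre : List Char),
    ((pvSplit pre l).map (fun x => x.count '\'')).sum = pre.count '\'' + l.count '\'' := by
  intro l
  induction l with
  | nil => intro pre; simp [pvSplit]
  | cons c t ih =>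
    intro pre
    by_cases hc : c = '\n'
    · subst hc
      rw [show pvSplit pre ('\n' :: t) = pre :: pvSplit [] t by simp [pvSplit]]
      simp [ih []]
    · rw [show pvSplit pre (c :: t) = pvSplit (pre ++ [c]) t by simp [pvSplit, hc]]
      rw [ih (pre ++ [c])]
      simp [List.count_append, List.count_cons]
      omega

lemma pvOddSum_eq : ∀ (L : List (List Char)),
    pvOddSum L = (((L.map (fun x => x.count '\'')).sum % 2) == 1) := by
  intro L
  induction L with
  | nil => simp [pvOddSum]
  | cons l t ih =>
    rw [show pvOddSum (l :: t) = (pvOddb l ^^ pvOddSum t) from rfl, ih]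
    rcases Nat.mod_two_eq_zero_or_one (l.count '\'') with h1 | h1 <;>
      rcases Nat.mod_two_eq_zero_or_one ((t.map (fun x => x.count '\'')).sum) with h2 | h2 <;>
      simp [pvOddb, h1, h2] <;> omega

-- ---------- scan lemmas ----------
lemma pvOddb_cons_quote (t : List Char) : pvOddb ('\'' :: t) = !(pvOddb t) := by
  unfold pvOddb
  have hcnt : ('\'' :: t).count '\'' = t.count '\'' + 1 := by simp
  rw [hcnt]
  rcases Nat.mod_two_eq_zero_or_one (t.count '\'') with h | h
  · have h2 : (t.count '\'' + 1) % 2 = 1 := by omega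
    rw [h, h2]
    decide
  · have h2 : (t.count '\'' + 1) % 2 = 0 := by omega
    rw [h, h2]
    decide

lemma pvScan_line : ∀ (l rest : List Char) (idx start : Nat) (lp p : Bool)
    (last : Option (Nat × Nat)), '\n' ∉ l →
    pvScan (l ++ rest) idx start lp p last
      = pvScan rest (idx + l.length) start (lp ^^ pvOddb l) (p ^^ pvOddb l) last := by
  intro l
  induction l with
  | nil => intro rest idx start lp p last _; simp [pvOddb]
  | cons c t ih =>
    intro rest idx start lp p last hnl
    have hc : c ≠ '\n' := by simp at hnl; exact fun h => hnl.1 h.symm |>.elim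
    have hnt : '\n' ∉ t := by simp at hnl; exact hnl.2
    by_cases hq : c = '\''
    · subst hq
      rw [show pvScan (('\'' :: t) ++ rest) idx start lp p last
          = pvScan (t ++ rest) (idx + 1) start (!lp) (!p) last by simp [pvScan]]
      rw [ih rest (idx + 1) start (!lp) (!p) last hnt]
      rw [pvOddb_cons_quote]
      have harith : idx + ('\'' :: t).length = idx + 1 + t.length := by
        simp [List.length_cons]; omega
      rw [harith]
      cases lp <;> cases p <;> cases h : pvOddb t <;> simp
    · rw [show pvScan ((c :: t) ++ rest) idx start lp p last
          = pvScan (t ++ rest) (idx + 1) start lp p last by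
            simp [pvScan, hq, fun h => hc h]]
      rw [ih rest (idx + 1) start lp p last hnt]
      have : pvOddb (c :: t) = pvOddb t := by simp [pvOddb, hq]
      rw [this]
      congr 1
      simp [List.length_cons]
      omega

lemma pvScan_lines : ∀ (L : List (List Char)) (idx : Nat) (p : Bool) (last : Option (Nat × Nat)),
    (∀ x ∈ L, '\n' ∉ x) →
    pvScan (List.intercalate ['\n'] L) idx idx false p last
      = (p ^^ pvOddSum L,
         match pvLastSpan L idx with
         | none => last
         | some sp => some sp) := by
  intro L
  induction L with
  | nil => intro idx p last _; simp [pvScan, pvOddSum, pvLastSpan, List.intercalate]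
  | cons l t ih =>
    intro idx p last hnl
    have hl : '\n' ∉ l := hnl l (by simp)
    cases t with
    | nil =>
      rw [show List.intercalate ['\n'] [l] = l ++ ([] : List Char) by simp [List.intercalate]]
      rw [pvScan_line l [] idx idx false p last hl]
      rw [show pvScan [] (idx + l.length) idx (false ^^ pvOddb l) (p ^^ pvOddb l) last
          = (p ^^ pvOddb l, if (false ^^ pvOddb l) then some (idx, idx + l.length) else last)
          from rfl]
      rw [show pvOddSum [l] = (pvOddb l ^^ false) from rfl]
      rw [show pvLastSpan [l] idx
          = (if pvOddb l then some (idx, idx + l.length) else none) by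
            simp [pvLastSpan]]
      cases h : pvOddb l <;> simp
    | cons m t' =>
      rw [pvInterCons l (m :: t') (by simp)]
      rw [show l ++ '\n' :: List.intercalate ['\n'] (m :: t')
          = l ++ ('\n' :: List.intercalate ['\n'] (m :: t')) from rfl]
      rw [pvScan_line l _ idx idx false p last hl]
      rw [show pvScan ('\n' :: List.intercalate ['\n'] (m :: t')) (idx + l.length) idx
            (false ^^ pvOddb l) (p ^^ pvOddb l) last
          = pvScan (List.intercalate ['\n'] (m :: t')) (idx + l.length + 1) (idx + l.length + 1)
            false (p ^^ pvOddb l)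
            (if (false ^^ pvOddb l) then some (idx, idx + l.length) else last) by
            simp [pvScan]]
      rw [ih (idx + l.length + 1) (p ^^ pvOddb l) _
        (fun x hx => hnl x (by simp [hx]))]
      rw [show pvOddSum (l :: m :: t') = (pvOddb l ^^ pvOddSum (m :: t')) from rfl]
      rw [show pvLastSpan (l :: m :: t') idx
          = (match pvLastSpan (m :: t') (idx + l.length + 1) with
             | some sp => some sp
             | none => if pvOddb l then some (idx, idx + l.length) else none) from rfl]
      cases hsp : pvLastSpan (m :: t') (idx + l.length + 1) with
      | some sp => simp
      | none => cases h : pvOddb l <;> simp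

-- ---------- last-odd-line bookkeeping ----------
lemma pvLastSpan_eq : ∀ (L : List (List Char)) (base : Nat),
    pvLastSpan L base
      = (pvLastOddC L).map (fun p => (base + pvOff L p.1, base + pvOff L p.1 + p.2.length)) := by
  intro L
  induction L with
  | nil => intro base; simp [pvLastSpan, pvLastOddC]
  | cons l t ih =>
    intro base
    rw [show pvLastSpan (l :: t) base
        = (match pvLastSpan t (base + l.length + 1) with
           | some sp => some sp
           | none => if pvOddb l then some (base, base + l.length) else none) from rfl]
    rw [ih (base + l.length + 1)]
    cases hc : pvLastOddC t with
    | some js =>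
      obtain ⟨j, s⟩ := js
      rw [show pvLastOddC (l :: t) = some (j + 1, s) by simp [pvLastOddC, hc]]
      simp [pvOff]
      omega
    | none =>
      rw [show pvLastOddC (l :: t) = (if pvOddb l then some (0, l) else none) by
        simp [pvLastOddC, hc]]
      cases h : pvOddb l <;> simp [pvOff]

lemma pvLastOddC_none : ∀ (L : List (List Char)), pvLastOddC L = none → pvOddSum L = false := by
  intro L
  induction L with
  | nil => intro _; simp [pvOddSum]
  | cons l t ih =>
    intro h
    rw [show pvOddSum (l :: t) = (pvOddb l ^^ pvOddSum t) from rfl]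
    cases hc : pvLastOddC t with
    | some js => simp [pvLastOddC, hc] at h
    | none =>
      have ht := ih hc
      simp [pvLastOddC, hc] at h
      by_cases hl : pvOddb l = true
      · simp [hl] at h
      · simp [Bool.eq_false_iff.mpr hl, ht]

lemma pvLastOddC_spec : ∀ (L : List (List Char)) (j : Nat) (s : List Char),
    pvLastOddC L = some (j, s) → j < L.length ∧ L[j]? = some s := by
  intro L
  induction L with
  | nil => intro j s h; simp [pvLastOddC] at h
  | cons l t ih =>
    intro j s h
    cases hc : pvLastOddC t with
    | some js =>
      obtain ⟨j', s'⟩ := js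
      rw [show pvLastOddC (l :: t) = some (j' + 1, s') by simp [pvLastOddC, hc]] at h
      have hj : j = j' + 1 := (Prod.mk.injEq _ _ _ _ ▸ Option.some.inj h).1.symm
      have hs : s = s' := (Prod.mk.injEq _ _ _ _ ▸ Option.some.inj h).2.symm
      subst hj
      obtain ⟨h1, h2⟩ := ih j' s' hc
      constructor
      · simp; omega
      · rw [hs]; simpa using h2
    | none =>
      rw [show pvLastOddC (l :: t) = (if pvOddb l then some (0, l) else none) by
        simp [pvLastOddC, hc]] at h
      by_cases hl : pvOddb l = true
      · rw [if_pos hl] at h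
        have hj : j = 0 := (Prod.mk.injEq _ _ _ _ ▸ Option.some.inj h).1.symm
        have hs : s = l := (Prod.mk.injEq _ _ _ _ ▸ Option.some.inj h).2.symm
        subst hj
        rw [hs]
        simp
      · simp [hl] at h

lemma pvLastOdd_map : ∀ (Ls : List String),
    pvLastOddC (Ls.map String.toList)
      = (pvLastOddS Ls).map (fun p => (p.1, p.2.toList)) := by
  intro Ls
  induction Ls with
  | nil => simp [pvLastOddC, pvLastOddS]
  | cons l t ih =>
    rw [show (l :: t).map String.toList = l.toList :: t.map String.toList from rfl]
    rw [show pvLastOddC (l.toList :: t.map String.toList)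
        = (match pvLastOddC (t.map String.toList) with
           | some (j, s) => some (j + 1, s)
           | none => if pvOddb l.toList then some (0, l.toList) else none) from rfl]
    rw [ih]
    rw [show pvLastOddS (l :: t)
        = (match pvLastOddS t with
           | some (j, s) => some (j + 1, s)
           | none => if pvOddQ l then some (0, l) else none) from rfl]
    cases hc : pvLastOddS t with
    | some js => obtain ⟨j, s⟩ := js; simp
    | none =>
      rw [← pvOddQ_eq]
      cases h : pvOddQ l <;> simp

-- ---------- A's reverse loop characterised by pvLastOddS ----------
def pvDescIdx (m : Nat) : List Int := (List.range m).map (fun k : Nat => ((m : Int) - 1 - (k : Int)))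

lemma pvDescIdx_succ (m : Nat) : pvDescIdx (m + 1) = (m : Int) :: pvDescIdx m := by
  unfold pvDescIdx
  rw [List.range_succ_eq_map, List.map_cons, List.map_map]
  congr 1
  · omega
  · apply List.map_congr_left
    intro k _
    simp only [Function.comp, Nat.succ_eq_add_one]
    push_cast
    ring

lemma pvPyRangeDesc (m : Nat) :
    PySem.List.pyRange ((m : Int) - 1) (-1) (-1) = pvDescIdx m := by
  rw [PySem.List.pyRange_neg_one]
  unfold pvDescIdx
  rw [show ((m : Int) - 1 - (-1)).toNat = m by omega]

lemma pvLastOddS_append_singleton (ys : List String) (x : String) :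
    pvLastOddS (ys ++ [x]) = if pvOddQ x then some (ys.length, x) else pvLastOddS ys := by
  induction ys with
  | nil =>
    simp only [List.nil_append, List.length_nil]
    rw [show pvLastOddS [x]
        = (match (none : Option (Nat × String)) with
           | some (j, s) => some (j + 1, s)
           | none => if pvOddQ x then some (0, x) else none) from rfl]
    cases h : pvOddQ x <;> simp [pvLastOddS]
  | cons l t ih =>
    rw [show (l :: t) ++ [x] = l :: (t ++ [x]) from rfl]
    rw [show pvLastOddS (l :: (t ++ [x]))
        = (match pvLastOddS (t ++ [x]) with
           | some (j, s) => some (j + 1, s)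
           | none => if pvOddQ l then some (0, l) else none) from rfl]
    rw [ih]
    rw [show pvLastOddS (l :: t)
        = (match pvLastOddS t with
           | some (j, s) => some (j + 1, s)
           | none => if pvOddQ l then some (0, l) else none) from rfl]
    by_cases hx : pvOddQ x = true
    · simp [hx, List.length_cons]
    · have hx' : pvOddQ x = false := Bool.eq_false_iff.mpr hx
      simp only [hx', Bool.false_eq_true, if_false]

lemma pvFixA_spec (full : List String) (init : List String) (hpre : init <+: full) :
    pvFixA full (pvDescIdx init.length) =
      match pvLastOddS init with
      | none => full
      | some (i, ln) =>
        if PySem.Str.endswith (PySem.Str.rstrip ln) "'" then full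
        else full.set i (PySem.Str.rstrip ln ++ "'") := by
  induction init using List.reverseRecOn with
  | nil => simp [pvDescIdx, pvLastOddS, pvFixA]
  | append_singleton ys x ih =>
    have hys : ys <+: full := (List.prefix_append ys [x]).trans hpre
    have hget : PySem.List.pyGet? full (ys.length : Int) = some x := by
      obtain ⟨t, ht⟩ := hpre
      have hlen : ys.length + 1 ≤ full.length := by
        rw [← ht]; simp
      simp only [PySem.List.pyGet?, PySem.List.pyIdx?]
      rw [if_pos (by omega), if_pos (by exact_mod_cast by omega)]
      simp only [Int.toNat_natCast, Option.bind_some]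
      rw [← ht, List.append_assoc, List.getElem?_append_right le_rfl]
      simp
    have hstep : pvFixA full ((ys.length : Int) :: pvDescIdx ys.length)
        = if PySem.Str.count (PySem.Str.replace x "''" "") "'" % 2 ≠ 0 then
            (if PySem.Str.endswith (PySem.Str.rstrip x) "'" then full
             else full.set ((ys.length : Int)).toNat (PySem.Str.rstrip x ++ "'"))
          else pvFixA full (pvDescIdx ys.length) := by
      rw [show pvFixA full ((ys.length : Int) :: pvDescIdx ys.length)
          = match PySem.List.pyGet? full (ys.length : Int) with
            | none => full
            | some li =>
              if PySem.Str.count (PySem.Str.replace li "''" "") "'" % 2 ≠ 0 then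
                if PySem.Str.endswith (PySem.Str.rstrip li) "'" then full
                else full.set (ys.length : Int).toNat (PySem.Str.rstrip li ++ "'")
              else pvFixA full (pvDescIdx ys.length) from rfl]
      rw [hget]
    rw [show (ys ++ [x]).length = ys.length + 1 by simp, pvDescIdx_succ, hstep]
    rw [pvLastOddS_append_singleton]
    by_cases hx : pvOddQ x = true
    · have hxp : PySem.Str.count (PySem.Str.replace x "''" "") "'" % 2 ≠ 0 := by
        simpa [pvOddQ] using hx
      simp only [hx, if_true, if_pos hxp, Int.toNat_natCast]
    · have hxp : ¬ PySem.Str.count (PySem.Str.replace x "''" "") "'" % 2 ≠ 0 := by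
        simpa [pvOddQ] using hx
      rw [if_neg hxp]
      simp only [Bool.eq_false_iff.mpr hx, Bool.false_eq_true, if_false]
      exact ih hys

-- ---------- intercalate surgery ----------
lemma pvInterGet : ∀ (L : List (List Char)) (i : Nat) (hi : i < L.length),
    ((List.intercalate ['\n'] L).drop (pvOff L i)).take (L[i].length) = L[i] := by
  intro L
  induction L with
  | nil => intro i hi; simp at hi
  | cons l t ih =>
    intro i hi
    cases i with
    | zero =>
      cases t with
      | nil => simp [List.intercalate, pvOff]
      | cons m t' =>
        rw [pvInterCons l (m :: t') (by simp)]
        simp only [pvOff, List.drop_zero, List.getElem_cons_zero]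
        rw [show l ++ '\n' :: List.intercalate ['\n'] (m :: t')
            = l ++ ('\n' :: List.intercalate ['\n'] (m :: t')) from rfl]
        exact List.take_left
    | succ i' =>
      have hi' : i' < t.length := by simpa using hi
      cases t with
      | nil => simp at hi'
      | cons m t' =>
        rw [pvInterCons l (m :: t') (by simp)]
        rw [show pvOff (l :: m :: t') (i' + 1) = l.length + 1 + pvOff (m :: t') i' from rfl]
        rw [show l ++ '\n' :: List.intercalate ['\n'] (m :: t')
            = (l ++ ['\n']) ++ List.intercalate ['\n'] (m :: t') by simp]
        rw [show l.length + 1 + pvOff (m :: t') i' = (l ++ ['\n']).length + pvOff (m :: t') i' by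
          simp]
        rw [List.drop_length_add_append]
        rw [show (l :: m :: t')[i' + 1] = (m :: t')[i'] from rfl]
        exact ih i' hi'

lemma pvInterSet : ∀ (L : List (List Char)) (i : Nat) (hi : i < L.length) (x : List Char),
    List.intercalate ['\n'] (L.set i x)
      = (List.intercalate ['\n'] L).take (pvOff L i) ++ x
        ++ (List.intercalate ['\n'] L).drop (pvOff L i + (L[i]).length) := by
  intro L
  induction L with
  | nil => intro i hi; simp at hi
  | cons l t ih =>
    intro i hi x
    cases i with
    | zero =>
      cases t with
      | nil =>
        simp [List.intercalate, pvOff]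
      | cons m t' =>
        rw [show (l :: m :: t').set 0 x = x :: m :: t' from rfl]
        rw [pvInterCons l (m :: t') (by simp), pvInterCons x (m :: t') (by simp)]
        simp only [pvOff, List.take_zero, List.nil_append, List.getElem_cons_zero, Nat.zero_add]
        rw [show l ++ '\n' :: List.intercalate ['\n'] (m :: t')
            = l ++ ('\n' :: List.intercalate ['\n'] (m :: t')) from rfl]
        rw [List.drop_left]
    | succ i' =>
      have hi' : i' < t.length := by simpa using hi
      cases t with
      | nil => simp at hi'
      | cons m t' =>
        rw [show (l :: m :: t').set (i' + 1) x = l :: (m :: t').set i' x from rfl]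
        have hne : (m :: t').set i' x ≠ [] := by
          intro h
          have := congrArg List.length h
          simp at this
        rw [pvInterCons l _ hne, pvInterCons l (m :: t') (by simp)]
        rw [ih i' hi' x]
        rw [show pvOff (l :: m :: t') (i' + 1) = l.length + 1 + pvOff (m :: t') i' from rfl]
        rw [show (l :: m :: t')[i' + 1] = (m :: t')[i'] from rfl]
        rw [show l ++ '\n' :: List.intercalate ['\n'] (m :: t')
            = (l ++ ['\n']) ++ List.intercalate ['\n'] (m :: t') by simp]
        rw [show l.length + 1 + pvOff (m :: t') i' = (l ++ ['\n']).length + pvOff (m :: t') i' by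
          simp]
        rw [show (l ++ ['\n']).length + pvOff (m :: t') i' + (m :: t')[i'].length
            = (l ++ ['\n']).length + (pvOff (m :: t') i' + (m :: t')[i'].length) by omega]
        rw [List.take_length_add_append, List.drop_length_add_append]
        simp

lemma pvStrExt {a b : String} (h : a.toList = b.toList) : a = b := by
  rw [← String.ofList_toList (s := a), ← String.ofList_toList (s := b), h]

-- ===== VERDICT (by name: the statement is the Claim_ definition above) =====
theorem balance_single_quotes_py_spec : Claim_equal_balance_single_quotes_py := by
  intro sql _
  unfold Spec_balance_single_quotes_py
  unfold balance_single_quotes_py balance_single_quotes_py_alt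
  set cs := sql.toList with hcs
  set L := pvSplit [] cs with hL
  have hnl : ∀ x ∈ L, '\n' ∉ x := pvSplit_no_nl cs [] (by simp)
  have hroundtrip : List.intercalate ['\n'] L = cs := by
    rw [hL, pvSplit_intercalate]
    simp
  -- evaluate B's scan
  have hscan : pvScan cs 0 0 false false none = (pvOddSum L, pvLastSpan L 0) := by
    rw [← hroundtrip, pvScan_lines L 0 false none hnl]
    cases h : pvLastSpan L 0 <;> simp
  -- A's parity condition equals B's
  have hparA : PySem.Str.count (PySem.Str.replace sql "''" "") "'" % 2 = cs.count '\'' % 2 :=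
    pvParityStr sql
  have hparB : pvOddSum L = ((cs.count '\'' % 2) == 1) := by
    rw [pvOddSum_eq]
    have := pvSplit_count cs []
    rw [← hL] at this
    rw [this]
    simp
  by_cases hc : PySem.Str.count (PySem.Str.replace sql "''" "") "'" % 2 = 0
  · -- even: both return sql
    have hsum : pvOddSum L = false := by
      rw [hparB]
      rw [hparA] at hc
      simp [hc]
    rw [if_pos hc, hscan, hsum]
  · -- odd
    rw [if_neg hc]
    have hodd : cs.count '\'' % 2 = 1 := by
      rw [hparA] at hc; omega
    have hsum : pvOddSum L = true := by rw [hparB, hodd]; simp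
    -- split? evaluates
    have hsplit : PySem.Str.split? sql "\n" = some (L.map String.ofList) := by
      have h1 : PySem.Chars.splitOn cs ['\n'] = L := by rw [pvSplitOn, ← hL]
      simp [PySem.Str.split?, PySem.Chars.split?,
        show ("\n" : String).toList = ['\n'] from rfl, ← hcs, h1]
    rw [hsplit]
    set Ls := L.map String.ofList with hLs
    rw [show (match some Ls with
        | none => sql
        | some lines => PySem.Str.join "\n"
            (pvFixA lines (PySem.List.pyRange ((lines.length : Int) - 1) (-1) (-1))))
      = PySem.Str.join "\n" (pvFixA Ls (PySem.List.pyRange ((Ls.length : Int) - 1) (-1) (-1)))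
      from rfl]
    have hLsLen : Ls.length = L.length := by simp [hLs]
    have hback : Ls.map String.toList = L := by
      rw [hLs, List.map_map]
      have : (String.toList ∘ String.ofList) = id := by
        funext z; simp [String.toList_ofList]
      rw [this, List.map_id]
    rw [show ((Ls.length : Int) - 1) = ((Ls.length : Int) - 1) from rfl, pvPyRangeDesc,
      pvFixA_spec Ls Ls (List.prefix_refl Ls)]
    -- the last odd line exists
    cases hlo : pvLastOddC L with
    | none =>
      exfalso
      have := pvLastOddC_none L hlo
      rw [hsum] at this
      exact Bool.true_eq_false ▸ this
    | some p =>
      obtain ⟨i, lc⟩ := p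
      obtain ⟨hi, hgetL⟩ := pvLastOddC_spec L i lc hlo
      have hgetL' : L[i]'hi = lc := by
        have := List.getElem?_eq_getElem hi
        rw [hgetL] at this
        exact (Option.some.inj this).symm
      -- string-level last odd line
      have hmap := pvLastOdd_map Ls
      rw [hback, hlo] at hmap
      cases hloS : pvLastOddS Ls with
      | none => rw [hloS] at hmap; simp at hmap
      | some q =>
        obtain ⟨i', ln⟩ := q
        rw [hloS] at hmap
        simp at hmap
        obtain ⟨hii, hln⟩ := hmap
        subst hii
        -- B's span
        have hspan : pvLastSpan L 0 = some (pvOff L i, pvOff L i + lc.length) := by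
          rw [pvLastSpan_eq, hlo]
          simp
        rw [hscan, hsum, hspan]
        show PySem.Str.join "\n"
            (if PySem.Str.endswith (PySem.Str.rstrip ln) "'" = true then Ls
             else Ls.set i (PySem.Str.rstrip ln ++ "'"))
          = (if PySem.Str.endswith (PySem.Str.rstrip (PySem.Str.slice sql
                (some ((pvOff L i : Nat) : Int))
                (some ((pvOff L i + lc.length : Nat) : Int)))) "'" = true then sql
             else PySem.Str.slice sql none (some ((pvOff L i : Nat) : Int))
               ++ PySem.Str.rstrip (PySem.Str.slice sql (some ((pvOff L i : Nat) : Int))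
                    (some ((pvOff L i + lc.length : Nat) : Int)))
               ++ "'" ++ PySem.Str.slice sql (some ((pvOff L i + lc.length : Nat) : Int)) none)
        -- B's sliced line has chars lc
        have hsliceLine : (PySem.Str.slice sql (some ((pvOff L i : Nat) : Int))
            (some ((pvOff L i + lc.length : Nat) : Int))).toList = lc := by
          rw [PySem.Str.toList_slice, PySem.Chars.slice_eq_listSlice, ← hcs,
            PySem.List.slice_natCast]
          rw [show pvOff L i + lc.length - pvOff L i = lc.length by omega]
          rw [← hroundtrip]
          have := pvInterGet L i hi
          rw [hgetL'] at this
          exact this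
        -- A's stripped string equals B's stripped string
        have hstrip : PySem.Str.rstrip ln
            = PySem.Str.rstrip (PySem.Str.slice sql (some ((pvOff L i : Nat) : Int))
                (some ((pvOff L i + lc.length : Nat) : Int))) := by
          apply pvStrExt
          rw [PySem.Str.toList_rstrip, PySem.Str.toList_rstrip, hsliceLine, hln]
        rw [← hstrip]
        by_cases hend : PySem.Str.endswith (PySem.Str.rstrip ln) "'" = true
        · rw [if_pos hend, if_pos hend]
          -- A returns join of the untouched lines = sql
          apply pvStrExt
          rw [show (PySem.Str.join "\n" Ls).toList
              = PySem.Chars.join ("\n").toList (Ls.map String.toList) by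
                simp [PySem.Str.join, String.toList_ofList]]
          rw [hback]
          rw [show ("\n" : String).toList = ['\n'] from rfl]
          rw [show PySem.Chars.join ['\n'] L = List.intercalate ['\n'] L from rfl]
          rw [hroundtrip]
        · rw [if_neg hend, if_neg hend]
          apply pvStrExt
          rw [show (PySem.Str.join "\n" (Ls.set i (PySem.Str.rstrip ln ++ "'"))).toList
              = PySem.Chars.join ("\n").toList ((Ls.set i (PySem.Str.rstrip ln ++ "'")).map
                  String.toList) by
                simp [PySem.Str.join, String.toList_ofList]]
          rw [List.map_set, hback]
          rw [show ("\n" : String).toList = ['\n'] from rfl]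
          rw [show PySem.Chars.join ['\n'] (L.set i (PySem.Str.rstrip ln ++ "'").toList)
              = List.intercalate ['\n'] (L.set i (PySem.Str.rstrip ln ++ "'").toList) from rfl]
          rw [pvInterSet L i hi]
          rw [hroundtrip, hgetL']
          -- now the B side
          simp only [String.toList_append, PySem.Str.toList_slice,
            PySem.Chars.slice_eq_listSlice]
          rw [← hcs, PySem.List.slice_to_natCast, PySem.List.slice_from_natCast]
          rw [show ("'" : String).toList = ['\''] from rfl]
          simp [List.append_assoc]
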